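-- pv_equiv track=rewrite | github.com/Youngseo-Jeon0313/baekjoon | ICT코테/1.py | getMinRooms
-- ===== SOURCE A (Python) =====
-- def getMinRooms(meetingTimings):
--     # Write your code here
--     events = []
--     for i in meetingTimings:
--         a=i[0]; b=i[1]
--         events.append([a,1])
--         events.append([b,-1])
--     events.sort()
--     count = 0
--     max_count = 0
--     for x,e in events:
--         count+=e
--         max_count=max(max_count, count)
--     return max_count
-- ===== SOURCE B (Python) =====
-- def getMinRooms(meetingTimings):
--     starts = sorted(s for s, e in meetingTimings)
--     ends = sorted(e for s, e in meetingTimings)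
--     n = len(ends)
--     j = 0
--     count = 0
--     best = 0
--     for s in starts:
--         while j < n and ends[j] <= s:
--             count -= 1
--             j += 1
--         count += 1
--         if count > best:
--             best = count
--     return best
-- ===== Notes on version B (the rewrite author's own statement) =====
-- stated objective: alternative
-- what changed: Replaces A's single sort of 2n tagged event pairs followed by a sweep with two separate sorts of the start and end times merged by a two-pointer scan (ends consumed with '<=' before each start, mirroring A's ends-before-starts tie order).
import Mathlib
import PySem

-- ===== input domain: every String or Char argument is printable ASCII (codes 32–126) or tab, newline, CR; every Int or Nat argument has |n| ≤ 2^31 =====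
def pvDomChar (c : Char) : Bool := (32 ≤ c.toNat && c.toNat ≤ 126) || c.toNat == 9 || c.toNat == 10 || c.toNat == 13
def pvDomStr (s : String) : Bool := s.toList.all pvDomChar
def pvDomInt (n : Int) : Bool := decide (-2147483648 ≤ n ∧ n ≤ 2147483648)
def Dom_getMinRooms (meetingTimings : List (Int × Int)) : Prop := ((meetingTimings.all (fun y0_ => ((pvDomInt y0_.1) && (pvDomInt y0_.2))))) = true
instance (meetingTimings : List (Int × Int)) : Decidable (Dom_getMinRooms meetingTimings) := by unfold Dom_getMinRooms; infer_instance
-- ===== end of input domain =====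

-- B replaces A's sort of 2n tagged events by two sorts of starts and ends plus a two-pointer merge; same asymptotic cost, alternative algorithm.

-- ===== PORT A =====
def getMinRooms (meetingTimings : List (Int × Int)) : Int :=
  let events := meetingTimings.foldl (fun acc i => acc ++ [(i.1, (1 : Int)), (i.2, (-1 : Int))]) []
  let events := PySem.List.sorted2 events (·.1) (·.2)
  (events.foldl (fun cm xe => (cm.1 + xe.2, max cm.2 (cm.1 + xe.2))) ((0 : Int), (0 : Int))).2

-- ===== PORT B =====
-- the Python while-loop 'while j < n and ends[j] <= s' advances index j through the
-- sorted ends; the port carries the remaining suffix ends[j:] instead of the index j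
def bConsume (s : Int) : List Int → Int → (List Int × Int)
  | [], count => ([], count)
  | e :: es, count => if e ≤ s then bConsume s es (count - 1) else (e :: es, count)

def bLoop : List Int → List Int → Int → Int → Int
  | [], _, _, best => best
  | s :: ss, es, count, best =>
    let r := bConsume s es count
    bLoop ss r.1 (r.2 + 1) (if r.2 + 1 > best then r.2 + 1 else best)

def getMinRooms_alt (meetingTimings : List (Int × Int)) : Int :=
  let starts := PySem.List.sorted (meetingTimings.map (·.1)) (fun x => x)
  let ends := PySem.List.sorted (meetingTimings.map (·.2)) (fun x => x)
  bLoop starts ends 0 0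

-- ===== PRECONDITION & SPEC =====
def Spec_getMinRooms (meetingTimings : List (Int × Int)) (out : Int) : Prop := out = getMinRooms_alt meetingTimings
instance (meetingTimings : List (Int × Int)) (out : Int) : Decidable (Spec_getMinRooms meetingTimings out) := by unfold Spec_getMinRooms; infer_instance

-- ===== CLAIM (what is proved, stated in full; the proofs are below) =====
def Claim_equal_getMinRooms : Prop := ∀ (meetingTimings : List (Int × Int)), Dom_getMinRooms meetingTimings → Spec_getMinRooms meetingTimings (getMinRooms meetingTimings)

-- ===== LEMMAS AND PROOFS =====

-- lexicographic ≤ on events, the order A's 'events.sort()' establishes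
def lexle (a b : Int × Int) : Prop := a.1 < b.1 ∨ (a.1 = b.1 ∧ a.2 ≤ b.2)

-- merge of the sorted starts (tagged +1) and sorted ends (tagged -1), ends first on ties
def mergeSE : List Int → List Int → List (Int × Int)
  | [], es => es.map (fun e => (e, -1))
  | s :: ss, [] => (s, 1) :: mergeSE ss []
  | s :: ss, e :: es =>
    if s < e then (s, 1) :: mergeSE ss (e :: es) else (e, -1) :: mergeSE (s :: ss) es
termination_by ss es => ss.length + es.length

theorem mem_mergeSE (ss es : List Int) (p : Int × Int) (hp : p ∈ mergeSE ss es) :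
    (p.2 = 1 ∧ p.1 ∈ ss) ∨ (p.2 = -1 ∧ p.1 ∈ es) := by
  induction ss, es using mergeSE.induct with
  | case1 es => simp [mergeSE] at hp; obtain ⟨e, he, rfl⟩ := hp; simp [he]
  | case2 s ss ih =>
    rw [mergeSE] at hp
    rcases List.mem_cons.1 hp with rfl | hp
    · simp
    · rcases ih hp with ⟨h1, h2⟩ | ⟨h1, h2⟩
      · exact Or.inl ⟨h1, List.mem_cons_of_mem _ h2⟩
      · simp at h2
  | case3 s ss e es hlt ih =>
    rw [mergeSE, if_pos hlt] at hp
    rcases List.mem_cons.1 hp with rfl | hp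
    · simp
    · rcases ih hp with ⟨h1, h2⟩ | ⟨h1, h2⟩
      · exact Or.inl ⟨h1, List.mem_cons_of_mem _ h2⟩
      · exact Or.inr ⟨h1, h2⟩
  | case4 s ss e es hlt ih =>
    rw [mergeSE, if_neg hlt] at hp
    rcases List.mem_cons.1 hp with rfl | hp
    · simp
    · rcases ih hp with ⟨h1, h2⟩ | ⟨h1, h2⟩
      · exact Or.inl ⟨h1, h2⟩
      · exact Or.inr ⟨h1, List.mem_cons_of_mem _ h2⟩

theorem mergeSE_pairwise (ss es : List Int)
    (hs : ss.Pairwise (· ≤ ·)) (he : es.Pairwise (· ≤ ·)) :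
    (mergeSE ss es).Pairwise lexle := by
  induction ss, es using mergeSE.induct with
  | case1 es =>
    rw [mergeSE, List.pairwise_map]
    exact he.imp (fun {a b} h => Or.elim (lt_or_eq_of_le h) Or.inl (fun h2 => Or.inr ⟨h2, le_refl _⟩))
  | case2 s ss ih =>
    rw [mergeSE]
    rcases List.pairwise_cons.1 hs with ⟨hhead, htail⟩
    refine List.pairwise_cons.2 ⟨?_, ih htail he⟩
    intro p hp
    rcases mem_mergeSE _ _ _ hp with ⟨h1, h2⟩ | ⟨h1, h2⟩
    · rcases lt_or_eq_of_le (hhead _ h2) with h | h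
      · exact Or.inl h
      · exact Or.inr ⟨h, by omega⟩
    · simp at h2
  | case3 s ss e es hlt ih =>
    rw [mergeSE, if_pos hlt]
    rcases List.pairwise_cons.1 hs with ⟨hhead, htail⟩
    refine List.pairwise_cons.2 ⟨?_, ih htail he⟩
    intro p hp
    rcases mem_mergeSE _ _ _ hp with ⟨h1, h2⟩ | ⟨h1, h2⟩
    · rcases lt_or_eq_of_le (hhead _ h2) with h | h
      · exact Or.inl h
      · exact Or.inr ⟨h, by omega⟩
    · rcases List.mem_cons.1 h2 with rfl | h2
      · exact Or.inl hlt
      · exact Or.inl (lt_of_lt_of_le hlt ((List.pairwise_cons.1 he).1 _ h2))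
  | case4 s ss e es hlt ih =>
    rw [mergeSE, if_neg hlt]
    replace hlt : e ≤ s := by omega
    rcases List.pairwise_cons.1 he with ⟨hhead, htail⟩
    refine List.pairwise_cons.2 ⟨?_, ih hs htail⟩
    intro p hp
    rcases mem_mergeSE _ _ _ hp with ⟨h1, h2⟩ | ⟨h1, h2⟩
    · rcases List.mem_cons.1 h2 with rfl | h2
      · rcases lt_or_eq_of_le hlt with h | h
        · exact Or.inl h
        · exact Or.inr ⟨h, by omega⟩
      · rcases lt_or_eq_of_le (le_trans hlt ((List.pairwise_cons.1 hs).1 _ h2)) with h | h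
        · exact Or.inl h
        · exact Or.inr ⟨h, by omega⟩
    · rcases lt_or_eq_of_le (hhead _ h2) with h | h
      · exact Or.inl h
      · exact Or.inr ⟨h, by omega⟩

theorem mergeSE_perm (ss es : List Int) :
    (mergeSE ss es).Perm (ss.map (fun s => (s, 1)) ++ es.map (fun e => (e, -1))) := by
  induction ss, es using mergeSE.induct with
  | case1 es => rw [mergeSE]; simp
  | case2 s ss ih => rw [mergeSE]; simpa using ih.cons ((s, (1 : Int)))
  | case3 s ss e es hlt ih => rw [mergeSE, if_pos hlt]; simpa using ih.cons ((s, (1 : Int)))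
  | case4 s ss e es hlt ih =>
    rw [mergeSE, if_neg hlt]
    exact (ih.cons (e, -1)).trans List.perm_middle.symm

theorem flatMap_perm (mt : List (Int × Int)) :
    (mt.flatMap (fun p => [(p.1, (1 : Int)), (p.2, (-1 : Int))])).Perm
      ((mt.map (·.1)).map (fun s => (s, 1)) ++ (mt.map (·.2)).map (fun e => (e, -1))) := by
  induction mt with
  | nil => simp
  | cons p rest ih =>
    simp only [List.flatMap_cons, List.map_cons, List.cons_append]
    refine List.Perm.trans ?_ (List.perm_middle.symm.cons _)
    exact (ih.cons _).cons _

-- the boolean comparator A's sort uses (lexicographic strict <)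
def bef (a b : Int × Int) : Bool :=
  decide (a.1 < b.1) || (!decide (b.1 < a.1) && decide (a.2 < b.2))

theorem insertBy_pairwise (x : Int × Int) (ys : List (Int × Int))
    (h : ys.Pairwise lexle) : (PySem.List.insertBy bef x ys).Pairwise lexle := by
  induction ys with
  | nil => simp [PySem.List.insertBy, lexle]
  | cons y ys ih =>
    rw [PySem.List.insertBy]
    rcases List.pairwise_cons.1 h with ⟨hhead, htail⟩
    by_cases hb : bef x y = true
    · rw [if_pos hb]
      simp only [bef, Bool.or_eq_true, Bool.and_eq_true, decide_eq_true_eq,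
        Bool.not_eq_true', decide_eq_false_iff_not] at hb
      refine List.pairwise_cons.2 ⟨?_, h⟩
      intro z hz
      rcases List.mem_cons.1 hz with rfl | hz
      · unfold lexle; omega
      · have := hhead _ hz
        unfold lexle at this ⊢; omega
    · rw [if_neg hb]
      refine List.pairwise_cons.2 ⟨?_, ih htail⟩
      intro z hz
      rcases (PySem.List.mem_insertBy _ _ _ _).1 hz with rfl | hz
      · simp only [bef, Bool.or_eq_true, Bool.and_eq_true, decide_eq_true_eq,
          Bool.not_eq_true', decide_eq_false_iff_not] at hb
        unfold lexle; omega
      · exact hhead _ hz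

theorem foldl_insertBy_pairwise (xs acc : List (Int × Int))
    (h : acc.Pairwise lexle) :
    (xs.foldl (fun acc x => PySem.List.insertBy bef x acc) acc).Pairwise lexle := by
  induction xs generalizing acc with
  | nil => exact h
  | cons x xs ih => exact ih _ (insertBy_pairwise x acc h)

theorem sorted2_pairwise_lexle (xs : List (Int × Int)) :
    (PySem.List.sorted2 xs (·.1) (·.2)).Pairwise lexle := by
  have : PySem.List.sorted2 xs (·.1) (·.2) =
      xs.foldl (fun acc x => PySem.List.insertBy bef x acc) [] := rfl
  rw [this]
  exact foldl_insertBy_pairwise xs [] (by simp)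

theorem lexle_antisymm (a b : Int × Int) (h1 : lexle a b) (h2 : lexle b a) : a = b := by
  unfold lexle at h1 h2
  obtain ⟨a1, a2⟩ := a; obtain ⟨b1, b2⟩ := b
  simp only [Prod.mk.injEq]
  constructor <;> omega

-- A's sweep, as a structural recursion (equal to A's foldl)
def sweep : List (Int × Int) → Int → Int → Int
  | [], _, m => m
  | xe :: rest, c, m => sweep rest (c + xe.2) (max m (c + xe.2))

theorem sweep_eq_foldl (l : List (Int × Int)) (c m : Int) :
    sweep l c m = (l.foldl (fun cm xe => (cm.1 + xe.2, max cm.2 (cm.1 + xe.2))) (c, m)).2 := by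
  induction l generalizing c m with
  | nil => rfl
  | cons xe rest ih => simp [sweep, ih]

theorem sweep_ends (es : List Int) (c m : Int) (h : c ≤ m) :
    sweep (es.map (fun e => (e, -1))) c m = m := by
  induction es generalizing c m with
  | nil => rfl
  | cons e es ih =>
    simp only [List.map_cons, sweep]
    rw [max_eq_left (by omega)]
    exact ih _ _ (by omega)

theorem sweep_mergeSE (ss es : List Int) : ∀ c m : Int, c ≤ m →
    sweep (mergeSE ss es) c m = bLoop ss es c m := by
  induction ss, es using mergeSE.induct with
  | case1 es => intro c m h; rw [mergeSE, bLoop]; exact sweep_ends es c m h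
  | case2 s ss ih =>
    intro c m h
    rw [mergeSE, bLoop]
    simp only [bConsume, sweep]
    rw [ih (c + 1) (max m (c + 1)) (le_max_right _ _)]
    congr 1
    omega
  | case3 s ss e es hlt ih =>
    intro c m h
    rw [mergeSE, if_pos hlt, bLoop]
    simp only [bConsume, if_neg (by omega : ¬ e ≤ s), sweep]
    rw [ih (c + 1) (max m (c + 1)) (le_max_right _ _)]
    congr 1
    omega
  | case4 s ss e es hlt ih =>
    intro c m h
    rw [mergeSE, if_neg hlt]
    have hL : sweep ((e, -1) :: mergeSE (s :: ss) es) c m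
        = sweep (mergeSE (s :: ss) es) (c - 1) m := by
      show sweep (mergeSE (s :: ss) es) (c + (-1)) (max m (c + (-1))) = _
      rw [max_eq_left (by omega), (by omega : c + (-1) = c - 1)]
    have hR : bLoop (s :: ss) (e :: es) c m = bLoop (s :: ss) es (c - 1) m := by
      simp only [bLoop, bConsume, if_pos (show e ≤ s by omega)]
    rw [hL, hR]
    exact ih (c - 1) m (by omega)

-- ===== VERDICT (by name: the statement is the Claim_ definition above) =====
theorem getMinRooms_spec : Claim_equal_getMinRooms := by
  intro mt _
  unfold Spec_getMinRooms getMinRooms getMinRooms_alt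
  simp only []
  set starts := PySem.List.sorted (mt.map (·.1)) (fun x => x) with hst
  set ends := PySem.List.sorted (mt.map (·.2)) (fun x => x) with hen
  have hev : mt.foldl (fun acc i => acc ++ [(i.1, (1 : Int)), (i.2, (-1 : Int))]) [] =
      mt.flatMap (fun p => [(p.1, (1 : Int)), (p.2, (-1 : Int))]) := by
    rw [PySem.List.foldl_append_eq_flatMap]; rfl
  have hsorted_eq : PySem.List.sorted2
      (mt.foldl (fun acc i => acc ++ [(i.1, (1 : Int)), (i.2, (-1 : Int))]) []) (·.1) (·.2)
      = mergeSE starts ends := by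
    apply List.Perm.eq_of_pairwise (le := lexle)
    · intro a b _ _ h1 h2; exact lexle_antisymm a b h1 h2
    · exact sorted2_pairwise_lexle _
    · exact mergeSE_pairwise starts ends
        (PySem.List.sorted_pairwise _ _) (PySem.List.sorted_pairwise _ _)
    · refine ((PySem.List.sorted2_perm _ _ _ _).trans ?_).trans (mergeSE_perm starts ends).symm
      rw [hev]
      refine (flatMap_perm mt).trans ?_
      exact (((PySem.List.sorted_perm (mt.map (·.1)) (fun x => x) false).symm.map _).append
        ((PySem.List.sorted_perm (mt.map (·.2)) (fun x => x) false).symm.map _))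
  rw [hsorted_eq, ← sweep_eq_foldl]
  exact sweep_mergeSE starts ends 0 0 le_rfl
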